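-- pv_equiv track=rewrite | github.com/Ascaris-Equi/PhsicoGPTCR | infer.py | decode_sequence
-- ===== SOURCE A (Python) =====
-- def decode_sequence(seq, rev_vocab_dict):
--     """将token ID转换回氨基酸序列"""
--     decoded = []
--     for token in seq:
--         aa = rev_vocab_dict.get(token, '<UNK>')
--         if aa == '<EOS>':
--             break
--         if aa not in ['<PAD>', '<UNK>', '< SOS >']:
--             decoded.append(aa)
--     return ''.join(decoded) if decoded else "<empty>"
-- ===== SOURCE B (Python) =====
-- def decode_sequence(seq, rev_vocab_dict):
--     """将token ID转换回氨基酸序列"""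
--     # Inverted approach: classify TOKEN IDs up front (which ids mean <EOS>),
--     # locate the cut position in seq, then decode only the kept token ids.
--     eos_tokens = {t for t, aa in rev_vocab_dict.items() if aa == '<EOS>'}
--     cut = next((i for i, t in enumerate(seq) if t in eos_tokens), len(seq))
--     specials = ('<PAD>', '<UNK>', '< SOS >')
--     pieces = [rev_vocab_dict[t] for t in seq[:cut]
--               if t in rev_vocab_dict and rev_vocab_dict[t] not in specials]
--     return ''.join(pieces) if pieces else "<empty>"
-- ===== Notes on version B (the rewrite author's own statement) =====
-- stated objective: alternative
-- what changed: Inverts the computation: instead of mapping each token to a string and breaking/filtering on string values inside one loop, B first builds from the vocab the set of token IDs meaning '<EOS>', locates the cut position in seq at the token-ID level, and only then decodes the kept IDs (skipping unknown/special ones) into the joined string.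
import Mathlib
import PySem

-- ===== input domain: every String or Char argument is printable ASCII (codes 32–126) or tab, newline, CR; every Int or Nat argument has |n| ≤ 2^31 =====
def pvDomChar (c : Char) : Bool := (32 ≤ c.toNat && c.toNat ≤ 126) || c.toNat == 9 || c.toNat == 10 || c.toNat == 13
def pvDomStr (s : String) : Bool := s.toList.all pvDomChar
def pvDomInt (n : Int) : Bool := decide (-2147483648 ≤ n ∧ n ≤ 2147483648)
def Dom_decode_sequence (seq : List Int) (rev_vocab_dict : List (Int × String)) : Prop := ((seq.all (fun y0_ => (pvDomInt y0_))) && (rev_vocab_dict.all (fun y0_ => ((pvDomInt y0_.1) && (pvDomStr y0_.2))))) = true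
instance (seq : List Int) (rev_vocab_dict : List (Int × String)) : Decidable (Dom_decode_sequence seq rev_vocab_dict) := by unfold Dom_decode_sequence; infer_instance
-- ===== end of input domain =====

-- B inverts the work: it classifies TOKEN IDs from the vocab (the set of ids meaning '<EOS>'),
-- finds the cut position in seq at the token level, then decodes only the kept ids; same values, same cost.

-- ===== PORT A =====
-- A's loop: walk tokens, break on '<EOS>', skip specials, collect the rest
def decodeLoopA : List Int → List (Int × String) → List String
  | [], _ => []
  | t :: ts, d =>
    let aa := (PySem.Dict.mk d).getD t "<UNK>"
    if aa = "<EOS>" then []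
    else if aa = "<PAD>" ∨ aa = "<UNK>" ∨ aa = "< SOS >" then decodeLoopA ts d
    else aa :: decodeLoopA ts d

def decode_sequence (seq : List Int) (rev_vocab_dict : List (Int × String)) : String :=
  let decoded := decodeLoopA seq rev_vocab_dict
  if decoded = [] then "<empty>" else PySem.Str.join "" decoded

-- ===== PORT B =====
-- cut = next((i for i, t in enumerate(seq) if t in eos_tokens), len(seq))
def findCutB (eos_tokens : PySem.Set Int) : List Int → Nat
  | [] => 0
  | t :: ts => if t ∈ eos_tokens then 0 else findCutB eos_tokens ts + 1

-- pieces = [rev_vocab_dict[t] for t in seq[:cut] if t in rev_vocab_dict and rev_vocab_dict[t] not in specials]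
def piecesB (d : PySem.Dict Int String) (kept : List Int) : List String :=
  kept.filterMap (fun t =>
    match d.get? t with
    | none => none
    | some aa => if aa = "<PAD>" ∨ aa = "<UNK>" ∨ aa = "< SOS >" then none else some aa)

def decode_sequence_alt (seq : List Int) (rev_vocab_dict : List (Int × String)) : String :=
  let d := PySem.Dict.mk rev_vocab_dict
  let eos_tokens : PySem.Set Int :=
    PySem.Set.ofList ((d.items.filter (fun p => p.2 == "<EOS>")).map Prod.fst)
  let cut := findCutB eos_tokens seq
  let pieces := piecesB d (seq.take cut)
  if pieces = [] then "<empty>" else PySem.Str.join "" pieces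

-- ===== PRECONDITION & SPEC =====
-- Pre_ excludes association lists with duplicate keys: they do not arise from a Python dict
-- (dict construction keeps the last value while the assoc-list convention looks up the first),
-- so no behaviour is canonical there.
def Pre_decode_sequence (seq : List Int) (rev_vocab_dict : List (Int × String)) : Prop :=
  (rev_vocab_dict.map Prod.fst).Nodup
instance (seq : List Int) (rev_vocab_dict : List (Int × String)) : Decidable (Pre_decode_sequence seq rev_vocab_dict) := by unfold Pre_decode_sequence; infer_instance

def pvWitness_decode_sequence : List Int × (List (Int × String)) :=
  ([0, 1, 2, 3, 4], [(0, "< SOS >"), (1, "M"), (2, "K"), (3, "<EOS>"), (4, "A")])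

def Spec_decode_sequence (seq : List Int) (rev_vocab_dict : List (Int × String)) (out : String) : Prop := out = decode_sequence_alt seq rev_vocab_dict
instance (seq : List Int) (rev_vocab_dict : List (Int × String)) (out : String) : Decidable (Spec_decode_sequence seq rev_vocab_dict out) := by unfold Spec_decode_sequence; infer_instance

-- ===== CLAIM (what is proved, stated in full; the proofs are below) =====
def Claim_equal_decode_sequence : Prop := ∀ (seq : List Int) (rev_vocab_dict : List (Int × String)), Dom_decode_sequence seq rev_vocab_dict → Pre_decode_sequence seq rev_vocab_dict → Spec_decode_sequence seq rev_vocab_dict (decode_sequence seq rev_vocab_dict)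

-- ===== LEMMAS AND PROOFS =====

-- a token id is in B's eos set iff it is bound (first match) to "<EOS>"
theorem mem_eosTokens_iff (l : List (Int × String)) (hn : ((PySem.Dict.mk l).keys).Nodup) (t : Int) :
    t ∈ PySem.Set.ofList (((PySem.Dict.mk l).items.filter (fun p => p.2 == "<EOS>")).map Prod.fst)
      ↔ (PySem.Dict.mk l).get? t = some "<EOS>" := by
  rw [PySem.Set.mem_ofList, PySem.Dict.get?_eq_some_iff_mem_items _ _ _ hn]
  constructor
  · rintro h
    simp only [List.mem_map, List.mem_filter, beq_iff_eq] at h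
    obtain ⟨⟨k, v⟩, ⟨hmem, hv⟩, hk⟩ := h
    subst hv; subst hk; exact hmem
  · intro h
    exact List.mem_map.mpr ⟨(t, "<EOS>"), List.mem_filter.mpr ⟨h, by simp⟩, rfl⟩

theorem decodeLoopA_eq_piecesB (seq : List Int) (l : List (Int × String))
    (hn : ((PySem.Dict.mk l).keys).Nodup) :
    decodeLoopA seq l =
      piecesB (PySem.Dict.mk l)
        ((seq.take (findCutB
          (PySem.Set.ofList (((PySem.Dict.mk l).items.filter (fun p => p.2 == "<EOS>")).map Prod.fst))
          seq))) := by
  induction seq with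
  | nil => simp [decodeLoopA, findCutB, piecesB]
  | cons t ts ih =>
    simp only [decodeLoopA]
    by_cases he : (PySem.Dict.mk l).getD t "<UNK>" = "<EOS>"
    · have hget : (PySem.Dict.mk l).get? t = some "<EOS>" := by
        rw [PySem.Dict.getD_eq_get?_getD] at he
        cases hg : (PySem.Dict.mk l).get? t with
        | none => rw [hg] at he; simp at he
        | some v => rw [hg] at he; simp at he; exact congrArg some he
      have hmem := (mem_eosTokens_iff l hn t).mpr hget
      rw [if_pos he]
      simp only [findCutB, if_pos hmem, List.take_zero, piecesB, List.filterMap_nil]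
    · have hnmem : t ∉ PySem.Set.ofList (((PySem.Dict.mk l).items.filter (fun p => p.2 == "<EOS>")).map Prod.fst) := by
        intro hmem
        have hget := (mem_eosTokens_iff l hn t).mp hmem
        exact he (by rw [PySem.Dict.getD_eq_get?_getD, hget]; rfl)
      rw [if_neg he]
      simp only [findCutB, if_neg hnmem, List.take_succ_cons, piecesB, List.filterMap_cons]
      rw [PySem.Dict.getD_eq_get?_getD] at he ⊢
      cases hg : (PySem.Dict.mk l).get? t with
      | none =>
        simp only [Option.getD_none] at he ⊢
        rw [if_pos (Or.inr (Or.inl trivial))]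
        exact ih
      | some aa =>
        simp only [Option.getD_some] at he ⊢
        by_cases hs : aa = "<PAD>" ∨ aa = "<UNK>" ∨ aa = "< SOS >"
        · rw [if_pos hs, if_pos hs]; exact ih
        · rw [if_neg hs, if_neg hs]; exact congrArg (aa :: ·) ih

-- ===== VERDICT (by name: the statement is the Claim_ definition above) =====
theorem decode_sequence_spec : Claim_equal_decode_sequence := by
  intro seq l _ hpre
  have hn : ((PySem.Dict.mk l).keys).Nodup := by
    simpa [PySem.Dict.keys] using hpre
  unfold Spec_decode_sequence decode_sequence decode_sequence_alt
  simp only [decodeLoopA_eq_piecesB seq l hn]
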